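-- pv_equiv track=rewrite | github.com/sornas/aoc | solutions/py/d16.py | square
-- ===== SOURCE A (Python) =====
-- def square(size):
--     s = ""
--     for y in range(size):
--         for x in range(size):
--             mod = (x+1) % (4*(y+1))
--             if mod < y+1:
--                 s += "0"
--             elif mod < 2*y + 2:
--                 s += "+"
--             elif mod < 3*y + 3:
--                 s += "0"
--             else:
--                 s += "-"
--             s += " "
--         s += "\n"
--     return s
-- ===== SOURCE B (Python) =====
-- def square(size):
--     # Each row y is periodic with period 4*(y+1): build the period template,
--     # rotate it left by one (the x+1 offset), tile it and cut to `size` cells.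
--     out = []
--     for y in range(size):
--         p = y + 1
--         t = "0" * p + "+" * p + "0" * p + "-" * p
--         rot = t[1:] + t[:1]
--         row = (rot * (size // (4 * p) + 1))[:size]
--         out.append(" ".join(row))
--         out.append(" \n")
--     return "".join(out)
-- ===== Notes on version B (the rewrite author's own statement) =====
-- stated objective: faster
-- what changed: A classifies every cell with a per-cell modulus and four-way branch inside nested loops; B builds each row's period-4*(y+1) template once, rotates it by one, tiles it by string repetition and slices to size, so the per-cell interpreter-level branch and modulus disappear into bulk string operations.
import Mathlib
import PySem

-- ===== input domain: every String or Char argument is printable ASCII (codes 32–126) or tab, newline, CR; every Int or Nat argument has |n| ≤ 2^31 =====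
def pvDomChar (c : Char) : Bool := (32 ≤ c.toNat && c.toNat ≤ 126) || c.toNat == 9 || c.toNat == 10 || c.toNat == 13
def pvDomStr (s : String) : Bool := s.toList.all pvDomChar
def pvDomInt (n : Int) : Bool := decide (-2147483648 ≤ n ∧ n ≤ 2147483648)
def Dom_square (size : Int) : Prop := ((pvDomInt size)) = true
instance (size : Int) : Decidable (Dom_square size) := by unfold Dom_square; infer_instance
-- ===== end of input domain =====

-- B replaces A's per-cell classification by per-row template tiling: build each row's
-- period-(4*(y+1)) template once, rotate, tile by repetition and cut to size (objective: faster by a constant factor, measured).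

-- ===== PORT A =====
def square (size : Int) : String :=
  String.ofList <|
    (PySem.List.pyRange 0 size).foldl (fun s y =>
      ((PySem.List.pyRange 0 size).foldl (fun s x =>
        let mod := PySem.Int.mod (x + 1) (4 * (y + 1))
        (s ++ (if mod < y + 1 then ['0']
               else if mod < 2 * y + 2 then ['+']
               else if mod < 3 * y + 3 then ['0']
               else ['-'])) ++ [' ']) s) ++ ['\n'])
      []

-- ===== PORT B =====
def square_alt (size : Int) : String :=
  String.ofList <| PySem.Chars.join [] <|
    (PySem.List.pyRange 0 size).foldl (fun out y =>
      let p := y + 1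
      let t := PySem.List.pyRepeat ['0'] p ++ PySem.List.pyRepeat ['+'] p ++
               PySem.List.pyRepeat ['0'] p ++ PySem.List.pyRepeat ['-'] p
      let rot := PySem.List.slice t (some 1) none ++ PySem.List.slice t none (some 1)
      let row := PySem.List.slice
        (PySem.List.pyRepeat rot (PySem.Int.floordiv size (4 * p) + 1)) none (some size)
      out ++ [PySem.Chars.join [' '] (row.map (fun c => [c])), [' ', '\n']])
      []

-- ===== PRECONDITION & SPEC =====
def Spec_square (size : Int) (out : String) : Prop := out = square_alt size
instance (size : Int) (out : String) : Decidable (Spec_square size out) := by unfold Spec_square; infer_instance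

-- ===== CLAIM (what is proved, stated in full; the proofs are below) =====
def Claim_equal_square : Prop := ∀ (size : Int), Dom_square size → Spec_square size (square size)

-- ===== LEMMAS AND PROOFS =====

def cellChar (p i : Nat) : Char :=
  if i < p then '0' else if i < 2 * p then '+' else if i < 3 * p then '0' else '-'

def canon (n : Nat) : List Char :=
  (List.range n).flatMap (fun v =>
    (List.range n).flatMap (fun k => [cellChar (v + 1) ((k + 1) % (4 * (v + 1))), ' ']) ++ ['\n'])

theorem join_nil_flatten (parts : List (List Char)) :
    PySem.Chars.join [] parts = parts.flatten := by
  induction parts with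
  | nil => simp [PySem.Chars.join_nil]
  | cons p rest ih =>
    cases rest with
    | nil => simp [PySem.Chars.join_singleton]
    | cons q r => simp [PySem.Chars.join_cons_cons] at *; simp [ih]

theorem mod_pos_eq (a b : Int) (h : 0 < b) : PySem.Int.mod a b = a % b := by
  simp [PySem.Int.mod, Int.fmod_eq_emod]; intro h2; omega

theorem pyRepeat_def {α : Type} (xs : List α) (n : Int) :
    PySem.List.pyRepeat xs n = List.flatten (List.replicate n.toNat xs) := rfl

theorem length_flatrep {α : Type} (xs : List α) (M : Nat) :
    (List.flatten (List.replicate M xs)).length = M * xs.length := by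
  induction M with
  | zero => simp
  | succ m ih => simp [List.replicate_succ, ih]; ring

theorem getElem_flatrep {α : Type} (xs : List α) (M k : Nat)
    (hk : k < (List.flatten (List.replicate M xs)).length)
    (hx : k % xs.length < xs.length) :
    (List.flatten (List.replicate M xs))[k] = xs[k % xs.length] := by
  induction M generalizing k with
  | zero => simp at hk
  | succ m ih =>
    rw [length_flatrep] at hk
    simp only [List.replicate_succ, List.flatten_cons]
    by_cases h : k < xs.length
    · rw [List.getElem_append_left h]
      congr 1
      exact (Nat.mod_eq_of_lt h).symm
    · have h' : xs.length ≤ k := Nat.le_of_not_lt h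
      have hmul : (m + 1) * xs.length = m * xs.length + xs.length := Nat.succ_mul m xs.length
      rw [List.getElem_append_right h']
      have hx' : (k - xs.length) % xs.length < xs.length := by rwa [← Nat.mod_eq_sub_mod h']
      rw [ih (k - xs.length) (by rw [length_flatrep]; omega) hx']
      congr 1
      exact (Nat.mod_eq_sub_mod h').symm

-- The rotated template of row v, as port B builds it.
def rotL (v : Nat) : List Char :=
  List.replicate v '0' ++ (List.replicate (v + 1) '+' ++ (List.replicate (v + 1) '0' ++
    (List.replicate (v + 1) '-' ++ ['0'])))

theorem length_rotL (v : Nat) : (rotL v).length = 4 * (v + 1) := by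
  simp [rotL]; ring

theorem getElem_rotL (v j : Nat) (hj : j < (rotL v).length) :
    (rotL v)[j] = cellChar (v + 1) ((j + 1) % (4 * (v + 1))) := by
  rw [length_rotL] at hj
  have hmod : (j + 1) % (4 * (v + 1)) = if j = 4 * (v + 1) - 1 then 0 else j + 1 := by
    split_ifs with h
    · subst h; rw [Nat.sub_add_cancel (by omega), Nat.mod_self]
    · exact Nat.mod_eq_of_lt (by omega)
  rw [hmod]
  unfold rotL cellChar
  by_cases h1 : j < v
  · rw [List.getElem_append_left (by simpa using h1)]
    simp only [List.getElem_replicate]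
    split_ifs <;> first | rfl | omega
  · rw [List.getElem_append_right (by simpa using h1)]
    by_cases h2 : j < 2 * v + 1
    · rw [List.getElem_append_left (by simp; omega)]
      simp only [List.getElem_replicate]
      split_ifs <;> first | rfl | omega
    · rw [List.getElem_append_right (by simp; omega)]
      by_cases h3 : j < 3 * v + 2
      · rw [List.getElem_append_left (by simp; omega)]
        simp only [List.getElem_replicate]
        split_ifs <;> first | rfl | omega
      · rw [List.getElem_append_right (by simp; omega)]
        by_cases h4 : j < 4 * v + 3
        · rw [List.getElem_append_left (by simp; omega)]
          simp only [List.getElem_replicate]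
          split_ifs <;> first | rfl | omega
        · rw [List.getElem_append_right (by simp; omega)]
          simp only [List.getElem_singleton]
          split_ifs <;> first | rfl | omega

-- port A's branch at cell (v, k), as a single character
theorem cell_eq (v k : Nat) :
    (if PySem.Int.mod ((k : Int) + 1) (4 * ((v : Int) + 1)) < (v : Int) + 1 then (['0'] : List Char)
     else if PySem.Int.mod ((k : Int) + 1) (4 * ((v : Int) + 1)) < 2 * (v : Int) + 2 then ['+']
     else if PySem.Int.mod ((k : Int) + 1) (4 * ((v : Int) + 1)) < 3 * (v : Int) + 3 then ['0']
     else ['-'])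
    = [cellChar (v + 1) ((k + 1) % (4 * (v + 1)))] := by
  have hmod : PySem.Int.mod ((k : Int) + 1) (4 * ((v : Int) + 1))
      = (((k + 1) % (4 * (v + 1)) : Nat) : Int) := by
    rw [mod_pos_eq _ _ (by positivity)]
    push_cast
    ring_nf
  rw [hmod]
  unfold cellChar
  have c1 : ((((k + 1) % (4 * (v + 1)) : Nat)) : Int) < (v : Int) + 1 ↔
      (k + 1) % (4 * (v + 1)) < v + 1 := by norm_cast
  have c2 : ((((k + 1) % (4 * (v + 1)) : Nat)) : Int) < 2 * (v : Int) + 2 ↔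
      (k + 1) % (4 * (v + 1)) < 2 * (v + 1) := by norm_cast
  have c3 : ((((k + 1) % (4 * (v + 1)) : Nat)) : Int) < 3 * (v : Int) + 3 ↔
      (k + 1) % (4 * (v + 1)) < 3 * (v + 1) := by norm_cast
  simp only [c1, c2, c3]
  split_ifs <;> rfl

theorem A_canon (size : Int) : square size = String.ofList (canon size.toNat) := by
  unfold square
  simp only [List.append_assoc, PySem.List.foldl_append_eq_flatMap, List.nil_append]
  rw [PySem.List.pyRange_one]
  have e1 : (size - 0).toNat = size.toNat := by norm_num
  have e2 : (fun k : Nat => (0 : Int) + (k : Int)) = (fun k : Nat => (k : Int)) := by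
    funext k; ring
  rw [e1, e2]
  unfold canon
  congr 1
  rw [List.flatMap_map]
  refine List.flatMap_congr (fun v hv => ?_)
  congr 1
  rw [List.flatMap_map]
  refine List.flatMap_congr (fun k hk => ?_)
  rw [cell_eq]
  rfl

-- join with a one-space separator over singletons, then a trailing space
theorem join_space (cs : List Char) (h : cs ≠ []) :
    PySem.Chars.join [' '] (cs.map (fun c => [c])) ++ [' ']
      = cs.flatMap (fun c => [c, ' ']) := by
  induction cs with
  | nil => simp at h
  | cons c rest ih =>
    cases rest with
    | nil => simp [PySem.Chars.join_singleton]
    | cons d r =>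
      simp only [List.map_cons, PySem.Chars.join_cons_cons, List.flatMap_cons]
      have hmc : ([d] : List Char) :: List.map (fun c => [c]) r
          = List.map (fun c => [c]) (d :: r) := rfl
      rw [hmc]
      simp only [List.append_assoc]
      rw [ih (by simp)]
      rfl

-- port B's row equals the canonical row's character list
theorem row_eq (n v : Nat) (hv : v < n) :
    PySem.List.slice
      (PySem.List.pyRepeat (rotL v) (PySem.Int.floordiv (n : Int) (4 * ((v : Int) + 1)) + 1))
      none (some (n : Int))
    = (List.range n).map (fun k => cellChar (v + 1) ((k + 1) % (4 * (v + 1)))) := by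
  set M : Int := PySem.Int.floordiv (n : Int) (4 * ((v : Int) + 1)) + 1 with hM
  have hMpos : 0 < M := by
    have : PySem.Int.floordiv (n : Int) (4 * ((v : Int) + 1)) ≥ 0 := by
      rw [ge_iff_le, ← not_lt, PySem.Int.floordiv_lt_iff_lt_mul (by positivity)]
      omega
    omega
  have hbig : n ≤ M.toNat * (4 * (v + 1)) := by
    have h1 : (n : Int) < M * (4 * ((v : Int) + 1)) := by
      rw [hM]
      rw [← PySem.Int.floordiv_lt_iff_lt_mul (b := 4 * ((v : Int) + 1)) (by positivity)]
      omega
    have h2 : (M : Int) = (M.toNat : Int) := by omega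
    rw [h2] at h1
    have : (n : Int) < ((M.toNat * (4 * (v + 1)) : Nat) : Int) := by push_cast; linarith
    exact_mod_cast this.le
  rw [PySem.List.slice_to _ (by positivity), pyRepeat_def]
  apply List.ext_getElem
  · rw [List.length_take, length_flatrep, length_rotL, List.length_map, List.length_range]
    simp; omega
  · intro k hk hk2
    rw [List.length_map, List.length_range] at hk2
    rw [List.getElem_take, List.getElem_map, List.getElem_range]
    have hlen : k < (List.flatten (List.replicate M.toNat (rotL v))).length := by
      rw [length_flatrep, length_rotL]; omega
    rw [getElem_flatrep _ _ _ hlen (by rw [length_rotL]; exact Nat.mod_lt _ (by omega))]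
    rw [getElem_rotL]
    congr 1
    rw [length_rotL]
    conv_lhs => rw [Nat.add_mod]
    conv_rhs => rw [Nat.add_mod]
    rw [Nat.mod_mod_of_dvd _ dvd_rfl]

theorem flatten_pair {α : Type} (l : List α) (f g : α → List Char) :
    (l.flatMap (fun y => [f y, g y])).flatten = l.flatMap (fun y => f y ++ g y) := by
  induction l with
  | nil => rfl
  | cons a l ih => simp [ih]

-- port B's inline rotation equals rotL
theorem rot_eq (v : Nat) :
    PySem.List.slice
      (PySem.List.pyRepeat ['0'] ((v : Int) + 1) ++ PySem.List.pyRepeat ['+'] ((v : Int) + 1) ++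
       PySem.List.pyRepeat ['0'] ((v : Int) + 1) ++ PySem.List.pyRepeat ['-'] ((v : Int) + 1))
      (some 1) none
    ++ PySem.List.slice
      (PySem.List.pyRepeat ['0'] ((v : Int) + 1) ++ PySem.List.pyRepeat ['+'] ((v : Int) + 1) ++
       PySem.List.pyRepeat ['0'] ((v : Int) + 1) ++ PySem.List.pyRepeat ['-'] ((v : Int) + 1))
      none (some 1)
    = rotL v := by
  have ht : ((v : Int) + 1).toNat = v + 1 := by omega
  simp only [PySem.List.pyRepeat_singleton, ht]
  rw [PySem.List.slice_from_one, PySem.List.slice_to _ (by omega)]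
  simp only [List.replicate_succ, List.cons_append, List.tail_cons]
  simp [rotL, List.replicate_succ]

theorem B_canon (size : Int) : square_alt size = String.ofList (canon size.toNat) := by
  unfold square_alt
  simp only [PySem.List.foldl_append_eq_flatMap, List.nil_append]
  rw [join_nil_flatten, flatten_pair]
  rw [PySem.List.pyRange_one]
  have e1 : (size - 0).toNat = size.toNat := by norm_num
  have e2 : (fun k : Nat => (0 : Int) + (k : Int)) = (fun k : Nat => (k : Int)) := by
    funext k; ring
  rw [e1, e2]
  set n := size.toNat with hn
  unfold canon
  congr 1
  rw [List.flatMap_map]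
  refine List.flatMap_congr (fun v hv => ?_)
  have hv' : v < n := List.mem_range.mp hv
  have hsz : size = (n : Int) := by omega
  rw [rot_eq v, hsz, row_eq n v hv']
  have hgrp : ∀ J : List Char, J ++ [' ', '
'] = (J ++ [' ']) ++ ['
'] := by
    intro J; simp
  rw [hgrp, join_space _ (by simp; omega), List.flatMap_map]

-- ===== VERDICT (by name: the statement is the Claim_ definition above) =====
theorem square_spec : Claim_equal_square := by
  intro size _
  unfold Spec_square
  rw [A_canon, B_canon]
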